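-- pv_equiv track=rewrite | github.com/tothefullest08/TIL-for-algorithm | 2019_Q3_Q4/코딜리티/binary_gap.py | inspection
-- ===== SOURCE A (Python) =====
-- def inspection(num):
--     array = []
--     for i in range(len(num)):
--         if num[i] == '1':
--             array.append(i)
--
--
--     if len(array) == 1:
--         return 0
--     else:
--         ans = 0
--         for i in range(len(array)-1):
--             sub_ans = array[i+1] - array[i]
--             if sub_ans > ans:
--                 ans = sub_ans
--
--         return ans - 1
-- ===== SOURCE B (Python) =====
-- def inspection(num):
--     parts = num.split('1')
--     if len(parts) == 1:
--         return -1
--     if len(parts) == 2: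
--         return 0
--     best = 0
--     for p in parts[1:-1]:
--         if len(p) > best:
--             best = len(p)
--     return best
-- ===== Notes on version B (the rewrite author's own statement) =====
-- stated objective: faster
-- what changed: B never looks at character indices: it splits the string at each one-bit into its zero-run segments (str.split) and returns the longest interior segment's length, with the segment count deciding the 0/-1 cases, instead of A's collect-one-indices-then-scan-adjacent-differences approach.
import Mathlib
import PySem

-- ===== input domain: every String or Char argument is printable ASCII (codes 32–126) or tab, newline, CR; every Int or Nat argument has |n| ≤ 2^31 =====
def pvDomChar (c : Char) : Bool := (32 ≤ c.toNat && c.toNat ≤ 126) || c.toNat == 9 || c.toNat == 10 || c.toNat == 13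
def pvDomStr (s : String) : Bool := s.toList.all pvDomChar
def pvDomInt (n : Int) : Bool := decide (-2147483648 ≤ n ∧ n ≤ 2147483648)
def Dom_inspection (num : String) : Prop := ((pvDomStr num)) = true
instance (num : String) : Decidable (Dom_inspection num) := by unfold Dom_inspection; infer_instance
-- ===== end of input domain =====

-- B abandons A's index arithmetic altogether: it splits the string on '1' into its
-- zero-run segments and returns the longest interior segment's length (the segment
-- count decides the no-one/-1 and single-one/0 cases). Same value on every input.

-- ===== PORT A =====
-- num[i] for i in range(len(num)) is always in range, so getD is exact here.
def inspection (num : String) : Int :=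
  let l := num.toList
  let array : List Int :=
    (List.range l.length).foldl
      (fun a i => if l.getD i ' ' = '1' then a ++ [(i : Int)] else a) []
  if array.length = 1 then 0
  else
    let ans : Int :=
      (List.range (array.length - 1)).foldl
        (fun ans i =>
          let sub := array.getD (i + 1) 0 - array.getD i 0
          if sub > ans then sub else ans) 0
    ans - 1

-- ===== PORT B =====
def inspection_alt (num : String) : Int :=
  let parts := PySem.Chars.splitOn num.toList ['1']
  if parts.length = 1 then -1
  else if parts.length = 2 then 0
  else
    (PySem.List.slice parts (some 1) (some (-1))).foldl
      (fun best p => if (p.length : Int) > best then (p.length : Int) else best) 0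

-- ===== PRECONDITION & SPEC =====
def Spec_inspection (num : String) (out : Int) : Prop := out = inspection_alt num
instance (num : String) (out : Int) : Decidable (Spec_inspection num out) := by unfold Spec_inspection; infer_instance

-- ===== CLAIM (what is proved, stated in full; the proofs are below) =====
def Claim_equal_inspection : Prop := ∀ (num : String), Dom_inspection num → Spec_inspection num (inspection num)

-- ===== LEMMAS AND PROOFS =====

-- positions of '1' in l, indices starting at k
def posFrom : List Char → Int → List Int
  | [], _ => []
  | c :: t, k => if c = '1' then k :: posFrom t (k + 1) else posFrom t (k + 1)

-- chained max of gaps, with the same '>' comparator both programs use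
def chainMax : Int → Int → List Int → Int
  | _, best, [] => best
  | last, best, p :: t => chainMax p (if p - last > best then p - last else best) t

-- the zero-run segments of l when split on '1'
def segs : List Char → List (List Char)
  | [] => [[]]
  | c :: t =>
    if c = '1' then [] :: segs t
    else match segs t with
      | [] => [[c]]
      | s :: r => (c :: s) :: r

-- zero-run lengths between consecutive one-positions
def gaps : Int → List Int → List Int
  | _, [] => []
  | last, q :: qs => (q - last - 1) :: gaps q qs

def foldMaxGT (init : Int) (xs : List Int) : Int :=
  xs.foldl (fun b x => if x > b then x else b) init

-- A's first loop builds posFrom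
theorem collect_eq (l : List Char) : ∀ (k : Nat) (acc : List Int),
    (List.range l.length).foldl
      (fun a i => if l.getD i ' ' = '1' then a ++ [((i : Int) + (k : Int))] else a) acc
      = acc ++ posFrom l (k : Int) := by
  induction l with
  | nil => intro k acc; simp [posFrom]
  | cons c t ih =>
    intro k acc
    rw [List.length_cons, List.range_succ_eq_map, List.foldl_cons, List.foldl_map]
    have hf : (fun (a : List Int) (i : Nat) =>
        if (c :: t).getD i.succ ' ' = '1' then a ++ [((i.succ : Int) + (k : Int))] else a)
        = (fun (a : List Int) (i : Nat) =>
        if t.getD i ' ' = '1' then a ++ [((i : Int) + ((k + 1 : Nat) : Int))] else a) := by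
      funext a i
      have hcast : ((i.succ : Int) + (k : Int)) = ((i : Int) + ((k + 1 : Nat) : Int)) := by
        push_cast; ring
      rw [hcast]
      simp
    rw [hf, ih (k + 1)]
    by_cases hc : c = '1'
    · simp [hc, posFrom]
    · simp [hc, posFrom]

-- A's second loop = chainMax
theorem scan_eq (rest : List Int) : ∀ (x a : Int),
    (List.range rest.length).foldl
      (fun ans i =>
        let sub := (x :: rest).getD (i + 1) 0 - (x :: rest).getD i 0
        if sub > ans then sub else ans) a
      = chainMax x a rest := by
  induction rest with
  | nil => intro x a; simp [chainMax]
  | cons y t ih =>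
    intro x a
    rw [List.length_cons, List.range_succ_eq_map, List.foldl_cons, List.foldl_map]
    have hf : (fun (ans : Int) (i : Nat) =>
        let sub := (x :: y :: t).getD (i.succ + 1) 0 - (x :: y :: t).getD i.succ 0
        if sub > ans then sub else ans)
        = (fun (ans : Int) (i : Nat) =>
        let sub := (y :: t).getD (i + 1) 0 - (y :: t).getD i 0
        if sub > ans then sub else ans) := by
      funext ans i
      simp [Nat.succ_eq_add_one]
    rw [hf, ih y]
    simp [chainMax]

theorem segs_ne_nil (l : List Char) : segs l ≠ [] := by
  cases l with
  | nil => simp [segs]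
  | cons c t =>
    simp only [segs]
    by_cases hc : c = '1'
    · simp [hc]
    · simp only [hc, if_false]
      cases segs t <;> simp

-- the library split with fuel computes segs
theorem splitOn_go_eq (fuel : Nat) : ∀ (l cur : List Char) (acc : List (List Char)),
    l.length < fuel →
    PySem.Chars.splitOn.go ['1'] fuel l cur acc
      = acc.reverse ++ (match segs l with
          | [] => []
          | s :: r => (cur.reverse ++ s) :: r) := by
  induction fuel with
  | zero => intro l cur acc h; omega
  | succ f ih =>
    intro l cur acc h
    cases l with
    | nil => simp [PySem.Chars.splitOn.go, segs]
    | cons c rest =>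
      rw [PySem.Chars.splitOn.go]
      by_cases hc : c = '1'
      · have hpre : List.isPrefixOf ['1'] (c :: rest) = true := by
          simp [List.isPrefixOf, hc]
        rw [if_pos hpre]
        have := ih rest [] (cur.reverse :: acc) (by simpa using Nat.lt_of_succ_lt_succ h)
        simp only [List.length_singleton, List.drop_one, List.tail_cons] at this ⊢
        rw [this]
        rcases hs : segs rest with _ | ⟨s, r⟩
        · exact absurd hs (segs_ne_nil rest)
        · simp [segs, hc, hs]
      · have hpre : List.isPrefixOf ['1'] (c :: rest) = false := by
          simp [List.isPrefixOf]
          exact fun h' => absurd h'.symm hc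
        rw [if_neg (by simp [hpre])]
        have := ih rest (c :: cur) acc (by simpa using Nat.lt_of_succ_lt_succ h)
        rw [this]
        rcases hs : segs rest with _ | ⟨s, r⟩
        · exact absurd hs (segs_ne_nil rest)
        · simp [segs, hc, hs]

theorem splitOn_eq_segs (l : List Char) : PySem.Chars.splitOn l ['1'] = segs l := by
  unfold PySem.Chars.splitOn
  rw [splitOn_go_eq (l.length + 1) l [] [] (by omega)]
  rcases hs : segs l with _ | ⟨s, r⟩
  · exact absurd hs (segs_ne_nil l)
  · simp

theorem segs_length (l : List Char) : ∀ (k : Int),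
    (segs l).length = (posFrom l k).length + 1 := by
  induction l with
  | nil => intro k; simp [segs, posFrom]
  | cons c t ih =>
    intro k
    by_cases hc : c = '1'
    · simp [segs, posFrom, hc, ih (k + 1)]
    · simp only [segs, posFrom, hc, if_false]
      rcases hs : segs t with _ | ⟨s, r⟩
      · exact absurd hs (segs_ne_nil t)
      · have := ih (k + 1)
        rw [hs] at this
        simpa using this

theorem posFrom_nil_segs (l : List Char) : ∀ (k : Int), posFrom l k = [] → segs l = [l] := by
  induction l with
  | nil => intro k _; simp [segs]
  | cons c t ih =>
    intro k h
    by_cases hc : c = '1'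
    · simp [posFrom, hc] at h
    · simp only [posFrom, hc, if_false] at h
      simp only [segs, hc, if_false, ih (k + 1) h]

theorem split_at_one (l : List Char) : ∀ (k p : Int) (ps : List Int),
    posFrom l k = p :: ps →
    ∃ s t, segs l = s :: segs t ∧ (s.length : Int) = p - k ∧ posFrom t (p + 1) = ps := by
  induction l with
  | nil => intro k p ps h; simp [posFrom] at h
  | cons c rest ih =>
    intro k p ps h
    by_cases hc : c = '1'
    · simp only [posFrom, hc, if_true, List.cons.injEq] at h
      obtain ⟨hk, hps⟩ := h
      exact ⟨[], rest, by simp [segs, hc], by simp [hk], by rw [← hk]; exact hps⟩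
    · simp only [posFrom, hc, if_false] at h
      obtain ⟨s, t, hseg, hlen, hpos⟩ := ih (k + 1) p ps h
      refine ⟨c :: s, t, ?_, ?_, hpos⟩
      · simp only [segs, hc, if_false, hseg]
      · simp only [List.length_cons]
        push_cast
        omega

theorem lens (ps : List Int) : ∀ (t : List Char) (p : Int),
    posFrom t (p + 1) = ps →
    (segs t).dropLast.map (fun s => (s.length : Int)) = gaps p ps := by
  induction ps with
  | nil =>
    intro t p h
    rw [posFrom_nil_segs t (p + 1) h]
    simp [gaps]
  | cons q qs ih =>
    intro t p h
    obtain ⟨s, t', hseg, hlen, hpos⟩ := split_at_one t (p + 1) q qs h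
    rw [hseg]
    rw [List.dropLast_cons_of_ne_nil (segs_ne_nil t')]
    simp only [List.map_cons, ih t' q hpos, gaps, hlen]
    congr 1
    ring

theorem chainMax_eq (ps : List Int) : ∀ (last best : Int),
    chainMax last best ps = foldMaxGT best ((gaps last ps).map (· + 1)) := by
  induction ps with
  | nil => intro last best; simp [chainMax, gaps, foldMaxGT]
  | cons q qs ih =>
    intro last best
    simp only [chainMax, gaps, List.map_cons, foldMaxGT, List.foldl_cons, ih]
    have : q - last - 1 + 1 = q - last := by ring
    rw [this]

theorem foldMaxGT_shift (xs : List Int) : ∀ (b : Int),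
    foldMaxGT b (xs.map (· + 1)) = foldMaxGT (b - 1) xs + 1 := by
  induction xs with
  | nil => intro b; simp [foldMaxGT]
  | cons x t ih =>
    intro b
    have h3 : (if x + 1 > b then x + 1 else b) - 1 = (if x > b - 1 then x else b - 1) := by
      split_ifs <;> omega
    calc foldMaxGT b ((x :: t).map (· + 1))
        = foldMaxGT (if x + 1 > b then x + 1 else b) (t.map (· + 1)) := rfl
      _ = foldMaxGT ((if x + 1 > b then x + 1 else b) - 1) t + 1 := ih _
      _ = foldMaxGT (if x > b - 1 then x else b - 1) t + 1 := by rw [h3]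
      _ = foldMaxGT (b - 1) (x :: t) + 1 := rfl

theorem foldMaxGT_neg_one (x : Int) (t : List Int) (hx : 0 ≤ x) :
    foldMaxGT (-1) (x :: t) = foldMaxGT 0 (x :: t) := by
  simp only [foldMaxGT, List.foldl_cons]
  congr 1
  split_ifs <;> omega

-- ===== VERDICT (by name: the statement is the Claim_ definition above) =====
theorem inspection_spec : Claim_equal_inspection := by
  intro num _
  simp only [Spec_inspection, inspection, inspection_alt]
  have hA := collect_eq num.toList 0 []
  simp only [Nat.cast_zero, add_zero, List.nil_append] at hA
  rw [hA, splitOn_eq_segs]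
  have hlen := segs_length num.toList 0
  rcases hps : posFrom num.toList 0 with _ | ⟨p, ps⟩
  · -- no ones: A's scan loop is empty, ans = 0, returns -1; B sees one segment
    rw [hps] at hlen
    simp [hlen]
  · rcases hps2 : ps with _ | ⟨q, r⟩
    · -- exactly one '1'
      rw [hps2] at hps; rw [hps] at hlen
      simp [hlen]
    · -- at least two ones
      rw [hps2] at hps; rw [hps] at hlen
      rw [if_neg (show ¬((p :: q :: r : List Int).length = 1) by simp)]
      rw [if_neg (show ¬((segs num.toList).length = 1) by rw [hlen]; simp)]
      rw [if_neg (show ¬((segs num.toList).length = 2) by rw [hlen]; simp)]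
      have hlen2 : ((p :: q :: r : List Int).length - 1) = (q :: r : List Int).length := by
        simp
      rw [hlen2, scan_eq (q :: r) p 0]
      -- B side: slice parts[1:-1] = interior segments
      obtain ⟨s, t, hseg, _, hpos⟩ := split_at_one num.toList 0 p (q :: r) hps
      have hpos' : posFrom t (p + 1) = q :: r := hpos
      rw [hseg]
      have hslice : PySem.List.slice (s :: segs t) (some 1) (some (-1))
          = (segs t).dropLast := by
        have hc1 : PySem.List.clampIdx (s :: segs t).length 1 = 1 := by
          simp only [PySem.List.clampIdx, List.length_cons]
          split_ifs <;> omega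
        have hc2 : PySem.List.clampIdx (s :: segs t).length (-1) = (segs t).length := by
          simp only [PySem.List.clampIdx, List.length_cons]
          split_ifs <;> omega
        simp only [PySem.List.slice, hc1, hc2, List.drop_one, List.tail_cons]
        rw [List.dropLast_eq_take]
      rw [hslice]
      have hmap : (segs t).dropLast.map (fun s => (s.length : Int)) = gaps p (q :: r) :=
        lens (q :: r) t p hpos'
      have hfold : (segs t).dropLast.foldl
          (fun best p => if (p.length : Int) > best then (p.length : Int) else best) 0
          = foldMaxGT 0 (gaps p (q :: r)) := by
        rw [← hmap, foldMaxGT, List.foldl_map]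
      rw [hfold, chainMax_eq, foldMaxGT_shift]
      norm_num
      have hhead : 0 ≤ q - p - 1 := by
        have : (segs t).dropLast.map (fun s => (s.length : Int)) = (q - p - 1) :: gaps q r := hmap
        rcases hd : (segs t).dropLast with _ | ⟨u, v⟩
        · rw [hd] at this; simp at this
        · rw [hd] at this
          simp only [List.map_cons, List.cons.injEq] at this
          have := this.1
          omega
      rw [show gaps p (q :: r) = (q - p - 1) :: gaps q r from rfl]
      rw [foldMaxGT_neg_one (q - p - 1) (gaps q r) hhead]
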